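-- pv_equiv track=rewrite | github.com/GMONNET-prof/projet_Trimino | trouve_case_occupee.py | trouve_case_occupee
-- ===== SOURCE A (Python) =====
-- def trouve_case_occupee(grille, x, y, delta):
--     for i in range(x,x+delta):
--         for j in range(y,y+delta):
--             if grille[i][j]!=0:
--                 if i < x+delta//2 and j < y+delta//2:
--                     return "BD"
--                 elif i >= x+delta//2 and j >=y+ delta//2:
--                     return"HG"
--                 elif i < x+delta//2 and j >= y+delta//2:
--                     return"BG"
--                 else:
--                     return"HD"
-- ===== SOURCE B (Python) =====
-- def trouve_case_occupee(grille, x, y, delta):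
--     mi = x + delta // 2
--     mj = y + delta // 2
--     quads = [("BD", x, mi, y, mj),
--              ("BG", x, mi, mj, y + delta),
--              ("HD", mi, x + delta, y, mj),
--              ("HG", mi, x + delta, mj, y + delta)]
--     cands = []
--     for lab, r0, r1, c0, c1 in quads:
--         for i in range(r0, r1):
--             found = None
--             for j in range(c0, c1):
--                 if grille[i][j] != 0:
--                     found = (i, j, lab)
--                     break
--             if found:
--                 cands.append(found)
--                 break
--     if not cands:
--         return None
--     return min(cands, key=lambda c: (c[0], c[1]))[2]
-- ===== Notes on version B (the rewrite author's own statement) =====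
-- stated objective: alternative
-- what changed: B searches the four quadrants of the window independently (one first-hit scan per quadrant, each carrying its fixed label) and then takes the candidate with the lexicographically smallest (i, j) via min(), instead of A's single row-major scan over the whole window with a four-way if/elif classification at the hit.
-- outside the precondition, e.g. on trouve_case_occupee([[0, 1]], 0, 0, 2): A returns 'BG', B raises IndexError
import Mathlib
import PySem

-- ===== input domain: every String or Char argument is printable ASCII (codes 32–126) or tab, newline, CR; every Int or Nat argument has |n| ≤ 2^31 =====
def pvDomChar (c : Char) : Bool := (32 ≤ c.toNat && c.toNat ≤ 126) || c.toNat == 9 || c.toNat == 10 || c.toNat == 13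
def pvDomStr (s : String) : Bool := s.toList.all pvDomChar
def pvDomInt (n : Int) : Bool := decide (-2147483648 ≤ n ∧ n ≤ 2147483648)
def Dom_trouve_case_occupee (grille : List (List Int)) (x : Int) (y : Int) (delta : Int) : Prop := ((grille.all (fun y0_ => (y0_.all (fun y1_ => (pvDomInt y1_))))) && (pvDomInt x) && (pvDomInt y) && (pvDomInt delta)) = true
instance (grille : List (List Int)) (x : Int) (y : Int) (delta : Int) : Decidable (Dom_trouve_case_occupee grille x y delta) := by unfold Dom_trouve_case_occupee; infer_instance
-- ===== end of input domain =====

-- B replaces A's single row-major scan with four independent per-quadrant first-hit searches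
-- combined by min() on (i, j); objective: alternative decomposition, same asymptotic cost.


-- ===== PORT A =====
-- grille[i][j] with Python semantics (negative index from the end; none = IndexError)
def pvCellA (grille : List (List Int)) (i j : Int) : Option Int :=
  (PySem.List.pyGet? grille i).bind (fun row => PySem.List.pyGet? row j)

-- A's inner 'for j' loop; 'none' = IndexError (excluded by Pre_), 'some none' = loop fell through
def pvInnerA (grille : List (List Int)) (x y delta i : Int) : List Int → Option (Option String)
  | [] => some none
  | j :: js =>
    match pvCellA grille i j with
    | none => none
    | some v =>
      if v ≠ 0 then
        some (some
          (if i < x + PySem.Int.floordiv delta 2 ∧ j < y + PySem.Int.floordiv delta 2 then "BD"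
           else if i ≥ x + PySem.Int.floordiv delta 2 ∧ j ≥ y + PySem.Int.floordiv delta 2 then "HG"
           else if i < x + PySem.Int.floordiv delta 2 ∧ j ≥ y + PySem.Int.floordiv delta 2 then "BG"
           else "HD"))
      else pvInnerA grille x y delta i js

-- A's outer 'for i' loop
def pvOuterA (grille : List (List Int)) (x y delta : Int) : List Int → Option (Option String)
  | [] => some none
  | i :: is =>
    match pvInnerA grille x y delta i (PySem.List.pyRange y (y + delta) 1) with
    | some none => pvOuterA grille x y delta is
    | r => r

def trouve_case_occupee (grille : List (List Int)) (x : Int) (y : Int) (delta : Int) : Option String :=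
  (pvOuterA grille x y delta (PySem.List.pyRange x (x + delta) 1)).getD none

-- ===== PORT B =====
-- the (i, j) pairs of one quadrant, row-major ('for i in range(r0, r1): for j in range(c0, c1)')
def pvQuadPairs (r0 r1 c0 c1 : Int) : List (Int × Int) :=
  (PySem.List.pyRange r0 r1 1).flatMap (fun i => (PySem.List.pyRange c0 c1 1).map (fun j => (i, j)))

-- 'grille[i][j] != 0'; the .getD 0 is exact inside Pre_ (every scanned access is in range)
def pvP (grille : List (List Int)) (p : Int × Int) : Bool :=
  decide (((PySem.List.pyGet? grille p.1).bind (fun row => PySem.List.pyGet? row p.2)).getD 0 ≠ 0)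

-- one iteration of B's 'for lab, r0, r1, c0, c1 in quads' loop: append the quadrant's first hit, if any
def pvStep (grille : List (List Int)) (acc : List (Int × Int × String))
    (q : String × Int × Int × Int × Int) : List (Int × Int × String) :=
  match (pvQuadPairs q.2.1 q.2.2.1 q.2.2.2.1 q.2.2.2.2).find? (fun pr => pvP grille pr) with
  | none => acc
  | some pr => acc ++ [(pr.1, pr.2, q.1)]

-- Source B: per-quadrant first-hit candidates, then min by the tuple key (c[0], c[1])
def trouve_case_occupee_alt (grille : List (List Int)) (x : Int) (y : Int) (delta : Int) : Option String :=
  let mi := x + PySem.Int.floordiv delta 2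
  let mj := y + PySem.Int.floordiv delta 2
  let quads : List (String × Int × Int × Int × Int) :=
    [("BD", x, mi, y, mj), ("BG", x, mi, mj, y + delta),
     ("HD", mi, x + delta, y, mj), ("HG", mi, x + delta, mj, y + delta)]
  match PySem.List.min2? (quads.foldl (pvStep grille) []) (fun c => c.1) (fun c => c.2.1) with
  | none => none
  | some c => some c.2.2

-- ===== PRECONDITION & SPEC =====
-- Pre_ requires every cell of the scanned window to be a valid (possibly negative) Python index.
-- Outside Pre_ the scan reaches an out-of-range index and whether a value is returned before the
-- IndexError is an artefact of the traversal order: A (row-major) and B (quadrant-by-quadrant)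
-- raise or return at different such inputs, so B's natural behaviour there is to raise.
def Pre_trouve_case_occupee (grille : List (List Int)) (x : Int) (y : Int) (delta : Int) : Prop :=
  delta ≤ 0 ∨
    (-(grille.length : Int) ≤ x ∧ x + delta ≤ (grille.length : Int) ∧
     ∀ p ∈ PySem.List.enumerate grille 0,
       ((x ≤ p.1 ∧ p.1 < x + delta) ∨
        (x + grille.length ≤ p.1 ∧ p.1 < x + delta + grille.length)) →
         (-(p.2.length : Int) ≤ y ∧ y + delta ≤ (p.2.length : Int)))
instance (grille : List (List Int)) (x : Int) (y : Int) (delta : Int) : Decidable (Pre_trouve_case_occupee grille x y delta) := by unfold Pre_trouve_case_occupee; infer_instance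

def pvWitness_trouve_case_occupee : List (List Int) × Int × Int × Int := ([[0, 0], [0, 3]], 0, 0, 2)

def Spec_trouve_case_occupee (grille : List (List Int)) (x : Int) (y : Int) (delta : Int) (out : Option String) : Prop := out = trouve_case_occupee_alt grille x y delta
instance (grille : List (List Int)) (x : Int) (y : Int) (delta : Int) (out : Option String) : Decidable (Spec_trouve_case_occupee grille x y delta out) := by unfold Spec_trouve_case_occupee; infer_instance

-- ===== CLAIM (what is proved, stated in full; the proofs are below) =====
def Claim_equal_trouve_case_occupee : Prop := ∀ (grille : List (List Int)) (x : Int) (y : Int) (delta : Int), Dom_trouve_case_occupee grille x y delta → Pre_trouve_case_occupee grille x y delta → Spec_trouve_case_occupee grille x y delta (trouve_case_occupee grille x y delta)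

-- ===== LEMMAS AND PROOFS =====

-- strict lexicographic order on (i, j) pairs: the row-major scan order
def pvLt (a b : Int × Int) : Prop := a.1 < b.1 ∨ (a.1 = b.1 ∧ a.2 < b.2)

-- A's four-branch classification, as a function (proof-side name for A's if/elif chain)
def pvClsA (m n i j : Int) : String :=
  if i < m ∧ j < n then "BD"
  else if i ≥ m ∧ j ≥ n then "HG"
  else if i < m ∧ j ≥ n then "BG"
  else "HD"

-- a valid (possibly negative) Python index yields a value
theorem pvGet_isSome {α : Type} (row : List α) (j : Int)
    (h1 : -(row.length : Int) ≤ j) (h2 : j < (row.length : Int)) :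
    (PySem.List.pyGet? row j).isSome := by
  rw [Option.isSome_iff_ne_none]
  intro hn
  rw [PySem.List.pyGet?_eq_none_iff] at hn
  apply hn
  unfold PySem.Raise.InRange
  omega

-- Pre_ (stated by inequalities) implies validity of every scanned access
theorem pvPre_scan (grille : List (List Int)) (x y delta : Int)
    (h : Pre_trouve_case_occupee grille x y delta) :
    ∀ i ∈ PySem.List.pyRange x (x + delta) 1,
      ∀ j ∈ PySem.List.pyRange y (y + delta) 1,
        ((PySem.List.pyGet? grille i).bind (fun row => PySem.List.pyGet? row j)).isSome := by
  intro i hi j hj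
  rw [PySem.List.mem_pyRange_one] at hi hj
  rcases h with hd | ⟨h1, h2, hr⟩
  · exfalso; omega
  by_cases hi0 : 0 ≤ i
  · have hlt : i < (grille.length : Int) := by omega
    rw [PySem.List.pyGet?_eq_some_getElem grille hi0 hlt, Option.bind_some]
    have hmem : ((i, grille[i.toNat]) : Int × List Int) ∈ PySem.List.enumerate grille 0 := by
      rw [PySem.List.mem_enumerate_iff]
      exact ⟨i.toNat, by omega, by simp [Int.toNat_of_nonneg hi0]⟩
    have hb := hr _ hmem (Or.inl (by simp; omega))
    dsimp only at hb
    exact pvGet_isSome _ j (by have h3 := hb.1; omega) (by have h4 := hb.2; omega)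
  · have hk0 : ((-i).toNat : Int) = -i := Int.toNat_of_nonneg (by omega)
    have hpos : 0 < (-i).toNat := by omega
    have hle : (-i).toNat ≤ grille.length := by omega
    have hi' : i = -(((-i).toNat : Int)) := by omega
    rw [hi', PySem.List.pyGet?_neg_natCast _ _ hpos hle]
    have hklt : grille.length - (-i).toNat < grille.length := by omega
    rw [List.getElem?_eq_getElem hklt, Option.bind_some]
    have hmem : (((grille.length - (-i).toNat : Nat) : Int), grille[grille.length - (-i).toNat]) ∈ PySem.List.enumerate grille 0 := by
      rw [PySem.List.mem_enumerate_iff]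
      exact ⟨grille.length - (-i).toNat, hklt, by simp⟩
    have hcast : (((grille.length - (-i).toNat : Nat) : Int)) = (grille.length : Int) + i := by
      push_cast [Nat.cast_sub hle]; omega
    have hb := hr _ hmem (Or.inr (by rw [hcast]; constructor <;> omega))
    dsimp only at hb
    exact pvGet_isSome _ j (by have h3 := hb.1; omega) (by have h4 := hb.2; omega)

-- A's inner loop = find? on the j-list (classified by pvClsA), once the scanned accesses are valid
theorem pvInnerA_eq (grille : List (List Int)) (x y delta i : Int) (js : List Int)
    (h : ∀ j ∈ js, ((PySem.List.pyGet? grille i).bind (fun row => PySem.List.pyGet? row j)).isSome) :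
    pvInnerA grille x y delta i js =
      some ((js.find? (fun j => pvP grille (i, j))).map
        (fun j => pvClsA (x + PySem.Int.floordiv delta 2) (y + PySem.Int.floordiv delta 2) i j)) := by
  induction js with
  | nil => rfl
  | cons j js ih =>
    obtain ⟨v, hv⟩ := Option.isSome_iff_exists.mp (h j List.mem_cons_self)
    have hcell : pvCellA grille i j = some v := hv
    by_cases hz : v = 0
    · have hp : pvP grille (i, j) = false := by
        simp only [pvP, hv, Option.getD_some, hz, decide_not, ne_eq, decide_true, Bool.not_true]
      simp only [pvInnerA, hcell, hz, ne_eq, not_true_eq_false, if_false,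
        List.find?_cons, hp, ih (fun a ha => h a (List.mem_cons_of_mem _ ha))]
    · have hp : pvP grille (i, j) = true := by
        simp only [pvP, hv, Option.getD_some, ne_eq, hz, not_false_eq_true, decide_true]
      simp only [pvInnerA, hcell, hz, ne_eq, not_false_eq_true, if_true,
        List.find?_cons, hp, Option.map_some, pvClsA]

-- A's outer loop = find? on the flattened pair list
theorem pvOuterA_eq (grille : List (List Int)) (x y delta : Int) (is : List Int)
    (h : ∀ i ∈ is, ∀ j ∈ PySem.List.pyRange y (y + delta) 1,
          ((PySem.List.pyGet? grille i).bind (fun row => PySem.List.pyGet? row j)).isSome) :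
    pvOuterA grille x y delta is =
      some (((is.flatMap (fun i => (PySem.List.pyRange y (y + delta) 1).map (fun j => (i, j)))).find?
               (fun p => pvP grille p)).map
        (fun p => pvClsA (x + PySem.Int.floordiv delta 2) (y + PySem.Int.floordiv delta 2) p.1 p.2)) := by
  induction is with
  | nil => rfl
  | cons i is ih =>
    have hrest := ih (fun a ha => h a (List.mem_cons_of_mem _ ha))
    rw [pvOuterA, pvInnerA_eq grille x y delta i _ (h i List.mem_cons_self),
      List.flatMap_cons, List.find?_append, List.find?_map]
    have hcomp : ((fun p => pvP grille p) ∘ fun j => (i, j)) = fun j => pvP grille (i, j) := rfl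
    rw [hcomp]
    cases hf : (PySem.List.pyRange y (y + delta) 1).find? (fun j => pvP grille (i, j)) with
    | none =>
      simp only [Option.map_none]
      exact hrest
    | some j =>
      rfl

-- membership in a quadrant's pair list is exactly the four bounds
theorem pvMem_quad (r0 r1 c0 c1 : Int) (p : Int × Int) :
    p ∈ pvQuadPairs r0 r1 c0 c1 ↔ (r0 ≤ p.1 ∧ p.1 < r1 ∧ c0 ≤ p.2 ∧ p.2 < c1) := by
  obtain ⟨i, j⟩ := p
  simp only [pvQuadPairs, List.mem_flatMap, List.mem_map, PySem.List.mem_pyRange_one,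
    Prod.mk.injEq]
  constructor
  · rintro ⟨i', hi', j', hj', h1, h2⟩
    subst h1; subst h2; exact ⟨hi'.1, hi'.2, hj'.1, hj'.2⟩
  · rintro ⟨h1, h2, h3, h4⟩
    exact ⟨i, ⟨h1, h2⟩, j, ⟨h3, h4⟩, rfl, rfl⟩

-- a quadrant's pair list is strictly increasing in the row-major (lexicographic) order
theorem pvQuad_pairwise (r0 r1 c0 c1 : Int) : (pvQuadPairs r0 r1 c0 c1).Pairwise pvLt := by
  unfold pvQuadPairs
  rw [List.pairwise_flatMap]
  constructor
  · intro i _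
    rw [List.pairwise_map]
    exact (PySem.List.pairwise_lt_pyRange_one c0 c1).imp (fun h => Or.inr ⟨rfl, h⟩)
  · refine (PySem.List.pairwise_lt_pyRange_one r0 r1).imp ?_
    intro i i' hlt a ha b hb
    simp only [List.mem_map] at ha hb
    obtain ⟨j, _, rfl⟩ := ha
    obtain ⟨j', _, rfl⟩ := hb
    exact Or.inl hlt

-- find? on a lexicographically sorted list returns a satisfying element minimal in pvLt
theorem pvFind_min {l : List (Int × Int)} {p : Int × Int → Bool} {a : Int × Int}
    (hl : l.Pairwise pvLt) (hf : l.find? p = some a) :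
    a ∈ l ∧ p a = true ∧ ∀ b ∈ l, p b = true → a = b ∨ pvLt a b := by
  induction l with
  | nil => simp at hf
  | cons c t ih =>
    rw [List.pairwise_cons] at hl
    rw [List.find?_cons] at hf
    by_cases hc : p c = true
    · rw [hc] at hf
      obtain rfl : c = a := by injection hf
      refine ⟨List.mem_cons_self, hc, ?_⟩
      intro b hb _
      rcases List.mem_cons.mp hb with rfl | hb
      · exact Or.inl rfl
      · exact Or.inr (hl.1 b hb)
    · rw [Bool.not_eq_true] at hc
      rw [hc] at hf
      obtain ⟨h1, h2, h3⟩ := ih hl.2 hf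
      refine ⟨List.mem_cons_of_mem _ h1, h2, ?_⟩
      intro b hb hpb
      rcases List.mem_cons.mp hb with rfl | hb
      · exact absurd hpb (by simp [hc])
      · exact h3 b hb hpb

-- conversely, the pvLt-minimal satisfying element of a sorted list is what find? returns
theorem pvFind_eq_some {l : List (Int × Int)} {p : Int × Int → Bool} {a : Int × Int}
    (hl : l.Pairwise pvLt) (ha : a ∈ l) (hpa : p a = true)
    (hmin : ∀ b ∈ l, p b = true → ¬ pvLt b a) : l.find? p = some a := by
  induction l with
  | nil => simp at ha
  | cons c t ih =>
    rw [List.pairwise_cons] at hl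
    rw [List.find?_cons]
    by_cases hc : p c = true
    · rw [hc]
      rcases List.mem_cons.mp ha with rfl | hat
      · rfl
      · exact absurd (hl.1 a hat) (hmin c List.mem_cons_self hc)
    · rw [Bool.not_eq_true] at hc
      rw [hc]
      rcases List.mem_cons.mp ha with rfl | hat
      · exact absurd hpa (by simp [hc])
      · exact ih hl.2 hat (fun b hb hpb => hmin b (List.mem_cons_of_mem _ hb) hpb)

-- elements produced by B's quadrant loop: each comes from one quadrant's find?, tagged with its label
theorem pvFold_mem (grille : List (List Int)) (quads : List (String × Int × Int × Int × Int))
    (acc : List (Int × Int × String)) (c : Int × Int × String) :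
    c ∈ quads.foldl (pvStep grille) acc ↔
      c ∈ acc ∨ ∃ q ∈ quads,
        (pvQuadPairs q.2.1 q.2.2.1 q.2.2.2.1 q.2.2.2.2).find? (fun pr => pvP grille pr) =
          some (c.1, c.2.1) ∧ c.2.2 = q.1 := by
  induction quads generalizing acc with
  | nil => simp
  | cons q qs ih =>
    rw [List.foldl_cons, ih]
    have hstep : c ∈ pvStep grille acc q ↔
        c ∈ acc ∨ ((pvQuadPairs q.2.1 q.2.2.1 q.2.2.2.1 q.2.2.2.2).find? (fun pr => pvP grille pr) =
          some (c.1, c.2.1) ∧ c.2.2 = q.1) := by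
      unfold pvStep
      cases hf : (pvQuadPairs q.2.1 q.2.2.1 q.2.2.2.1 q.2.2.2.2).find? (fun pr => pvP grille pr) with
      | none => simp
      | some pr =>
        dsimp only
        constructor
        · intro hmem
          rcases List.mem_append.mp hmem with h | h
          · exact Or.inl h
          · have hceq : c = (pr.1, pr.2, q.1) := by simpa using h
            refine Or.inr ⟨?_, ?_⟩
            · rw [hceq]
            · rw [hceq]
        · rintro (h | ⟨heq, hlab⟩)
          · exact List.mem_append.mpr (Or.inl h)
          · apply List.mem_append.mpr
            right
            injection heq with heq'
            obtain ⟨ci, cj, cl⟩ := c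
            obtain ⟨i, j⟩ := pr
            simp only [Prod.mk.injEq] at heq'
            simp only [List.mem_singleton, Prod.mk.injEq]
            exact ⟨heq'.1.symm, heq'.2.symm, hlab⟩
    rw [hstep]
    simp only [List.mem_cons]
    constructor
    · rintro ((h | h) | ⟨q', hq', h⟩)
      · exact Or.inl h
      · exact Or.inr ⟨q, Or.inl rfl, h⟩
      · exact Or.inr ⟨q', Or.inr hq', h⟩
    · rintro (h | ⟨q', (rfl | hq'), h⟩)
      · exact Or.inl (Or.inl h)
      · exact Or.inl (Or.inr h)
      · exact Or.inr ⟨q', hq', h⟩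

-- if every quadrant's find? misses, the loop appends nothing
theorem pvFold_nil (grille : List (List Int)) (quads : List (String × Int × Int × Int × Int))
    (acc : List (Int × Int × String))
    (h : ∀ q ∈ quads,
      (pvQuadPairs q.2.1 q.2.2.1 q.2.2.2.1 q.2.2.2.2).find? (fun pr => pvP grille pr) = none) :
    quads.foldl (pvStep grille) acc = acc := by
  induction quads generalizing acc with
  | nil => rfl
  | cons q qs ih =>
    rw [List.foldl_cons]
    have hq := h q List.mem_cons_self
    unfold pvStep
    rw [hq]
    exact ih acc (fun q' hq' => h q' (List.mem_cons_of_mem _ hq'))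

-- one comparison step of Python's min(cands, key=lambda c: (c[0], c[1]))
def pvMinStep (acc : Option (Int × Int × String)) (x : Int × Int × String) :
    Option (Int × Int × String) :=
  match acc with
  | none => some x
  | some m =>
    if (decide (x.1 < m.1) || !decide (m.1 < x.1) && decide (x.2.1 < m.2.1)) = true
    then some x else some m

theorem pvMin2_eq (l : List (Int × Int × String)) :
    PySem.List.min2? l (fun t => t.1) (fun t => t.2.1) = l.foldl pvMinStep none := by
  unfold PySem.List.min2?
  congr 1
  funext acc x
  cases acc <;> rfl

-- the comparison is false when the accumulator m is already (weakly) below b …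
theorem pvCondFalse (m b : Int × Int × String)
    (h : b = m ∨ pvLt (m.1, m.2.1) (b.1, b.2.1)) :
    (decide (b.1 < m.1) || !decide (m.1 < b.1) && decide (b.2.1 < m.2.1)) = false := by
  have hh : m.1 < b.1 ∨ (m.1 = b.1 ∧ m.2.1 ≤ b.2.1) := by
    rcases h with rfl | h
    · exact Or.inr ⟨rfl, le_refl _⟩
    · unfold pvLt at h
      dsimp at h
      omega
  rcases hh with h1 | ⟨h1, h2⟩
  · simp [show ¬ b.1 < m.1 by omega, h1]
  · simp [show ¬ b.1 < m.1 by omega, show ¬ m.1 < b.1 by omega, show ¬ b.2.1 < m.2.1 by omega]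

-- … and true when the new element b is strictly below the accumulator m
theorem pvCondTrue (m b : Int × Int × String)
    (h : pvLt (b.1, b.2.1) (m.1, m.2.1)) :
    (decide (b.1 < m.1) || !decide (m.1 < b.1) && decide (b.2.1 < m.2.1)) = true := by
  unfold pvLt at h
  dsimp at h
  rcases h with h1 | ⟨h1, h2⟩
  · simp [h1]
  · simp [show ¬ b.1 < m.1 by omega, show ¬ m.1 < b.1 by omega, h2]

-- min()'s fold keeps an accumulator that is (weakly) below everything remaining
theorem pvK1 (t : List (Int × Int × String)) (m : Int × Int × String)
    (h : ∀ b ∈ t, b = m ∨ pvLt (m.1, m.2.1) (b.1, b.2.1)) :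
    t.foldl pvMinStep (some m) = some m := by
  induction t with
  | nil => rfl
  | cons b t' ih =>
    rw [List.foldl_cons]
    show t'.foldl pvMinStep (if _ then some b else some m) = some m
    rw [if_neg (by rw [pvCondFalse m b (h b List.mem_cons_self)]; simp)]
    exact ih (fun b' hb' => h b' (List.mem_cons_of_mem _ hb'))

-- min()'s fold reaches the strict minimum c once the accumulator is above it
theorem pvK2 (t : List (Int × Int × String)) (c : Int × Int × String) :
    ∀ m : Int × Int × String, c ∈ t →
      (∀ b ∈ t, b = c ∨ pvLt (c.1, c.2.1) (b.1, b.2.1)) →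
      pvLt (c.1, c.2.1) (m.1, m.2.1) →
      t.foldl pvMinStep (some m) = some c := by
  induction t with
  | nil => intro m hc _ _; simp at hc
  | cons d t' ih =>
    intro m hc hall hmlt
    have hrest : ∀ b ∈ t', b = c ∨ pvLt (c.1, c.2.1) (b.1, b.2.1) :=
      fun b hb => hall b (List.mem_cons_of_mem _ hb)
    rw [List.foldl_cons]
    show t'.foldl pvMinStep (if _ then some d else some m) = some c
    by_cases hdc : d = c
    · rw [hdc, if_pos (pvCondTrue m c hmlt)]
      exact pvK1 t' c hrest
    · have hlt := (hall d List.mem_cons_self).resolve_left hdc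
      have hc' : c ∈ t' := (List.mem_cons.mp hc).resolve_left (fun h => hdc h.symm)
      by_cases hcond : (decide (d.1 < m.1) || !decide (m.1 < d.1) && decide (d.2.1 < m.2.1)) = true
      · rw [if_pos hcond]
        exact ih d hc' hrest hlt
      · rw [if_neg hcond]
        exact ih m hc' hrest hmlt

-- Python's min(cands, key=…) returns c when c is in the list and strictly below every other element
theorem pvMin2_unique (l : List (Int × Int × String)) (c : Int × Int × String)
    (hc : c ∈ l) (hall : ∀ b ∈ l, b = c ∨ pvLt (c.1, c.2.1) (b.1, b.2.1)) :
    PySem.List.min2? l (fun t => t.1) (fun t => t.2.1) = some c := by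
  rw [pvMin2_eq]
  cases l with
  | nil => simp at hc
  | cons d t =>
    rw [List.foldl_cons]
    show t.foldl pvMinStep (some d) = some c
    have hrest : ∀ b ∈ t, b = c ∨ pvLt (c.1, c.2.1) (b.1, b.2.1) :=
      fun b hb => hall b (List.mem_cons_of_mem _ hb)
    by_cases hdc : d = c
    · rw [hdc]
      exact pvK1 t c hrest
    · have hlt := (hall d List.mem_cons_self).resolve_left hdc
      have hc' : c ∈ t := (List.mem_cons.mp hc).resolve_left (fun h => hdc h.symm)
      exact pvK2 t c d hc' hrest hlt

-- the candidate of the quadrant containing the row-major first hit wins B's min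
theorem pvPick (grille : List (List Int)) (W : List (Int × Int))
    (quads : List (String × Int × Int × Int × Int)) (a : Int × Int) (lab : String)
    (hsub : ∀ q ∈ quads, ∀ pr ∈ pvQuadPairs q.2.1 q.2.2.1 q.2.2.2.1 q.2.2.2.2, pr ∈ W)
    (hamem : ∃ q ∈ quads, q.1 = lab ∧ a ∈ pvQuadPairs q.2.1 q.2.2.1 q.2.2.2.1 q.2.2.2.2)
    (hdisj : ∀ q ∈ quads, a ∈ pvQuadPairs q.2.1 q.2.2.1 q.2.2.2.1 q.2.2.2.2 → q.1 = lab)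
    (hpa : pvP grille a = true)
    (hmin : ∀ b ∈ W, pvP grille b = true → a = b ∨ pvLt a b) :
    PySem.List.min2? (quads.foldl (pvStep grille) []) (fun t => t.1) (fun t => t.2.1) =
      some (a.1, a.2, lab) := by
  obtain ⟨q0, hq0, hq0lab, haq0⟩ := hamem
  have hfind : (pvQuadPairs q0.2.1 q0.2.2.1 q0.2.2.2.1 q0.2.2.2.2).find? (fun pr => pvP grille pr) =
      some a := by
    apply pvFind_eq_some (pvQuad_pairwise _ _ _ _) haq0 hpa
    intro b hb hpb
    rcases hmin b (hsub q0 hq0 b hb) hpb with rfl | h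
    · unfold pvLt
      omega
    · unfold pvLt at h ⊢
      omega
  apply pvMin2_unique
  · rw [pvFold_mem]
    refine Or.inr ⟨q0, hq0, ?_, hq0lab.symm⟩
    simpa using hfind
  · intro b hb
    rw [pvFold_mem] at hb
    rcases hb with h | ⟨q, hq, hfq, hlab⟩
    · simp at h
    · obtain ⟨hbq, hpb, _⟩ := pvFind_min (pvQuad_pairwise _ _ _ _) hfq
      rcases hmin _ (hsub q hq _ hbq) hpb with heq | hlt
      · left
        have hq1 : q.1 = lab := hdisj q hq (heq ▸ hbq)
        obtain ⟨bi, bj, bl⟩ := b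
        obtain ⟨ai, aj⟩ := a
        simp only [Prod.mk.injEq] at heq
        simp only [Prod.mk.injEq]
        exact ⟨heq.1.symm, heq.2.symm, hlab.trans hq1⟩
      · right
        exact hlt

-- both sides, after A's loops have been characterised: the window's find? vs B's quadrant min
theorem pvFinal (grille : List (List Int)) (x y delta mi mj : Int)
    (hmi : mi = x + delta / 2) (hmj : mj = y + delta / 2) :
    (some ((List.find? (fun pr => pvP grille pr) (pvQuadPairs x (x + delta) y (y + delta))).map
        (fun p => pvClsA mi mj p.1 p.2))).getD none =
      (match PySem.List.min2?
          (([("BD", x, mi, y, mj), ("BG", x, mi, mj, y + delta),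
             ("HD", mi, x + delta, y, mj), ("HG", mi, x + delta, mj, y + delta)] :
            List (String × Int × Int × Int × Int)).foldl (pvStep grille) [])
          (fun c => c.1) (fun c => c.2.1) with
       | none => none
       | some c => some c.2.2) := by
  have hsub : ∀ q ∈ ([("BD", x, mi, y, mj), ("BG", x, mi, mj, y + delta),
        ("HD", mi, x + delta, y, mj), ("HG", mi, x + delta, mj, y + delta)] :
        List (String × Int × Int × Int × Int)),
      ∀ pr ∈ pvQuadPairs q.2.1 q.2.2.1 q.2.2.2.1 q.2.2.2.2,
        pr ∈ pvQuadPairs x (x + delta) y (y + delta) := by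
    intro q hq pr hpr
    rw [pvMem_quad]
    fin_cases hq <;>
      · rw [pvMem_quad] at hpr
        dsimp at hpr ⊢
        omega
  cases hf : (pvQuadPairs x (x + delta) y (y + delta)).find? (fun pr => pvP grille pr) with
  | none =>
    have hnone : ∀ q ∈ ([("BD", x, mi, y, mj), ("BG", x, mi, mj, y + delta),
          ("HD", mi, x + delta, y, mj), ("HG", mi, x + delta, mj, y + delta)] :
          List (String × Int × Int × Int × Int)),
        (pvQuadPairs q.2.1 q.2.2.1 q.2.2.2.1 q.2.2.2.2).find? (fun pr => pvP grille pr) = none := by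
      intro q hq
      rw [List.find?_eq_none]
      intro pr hpr
      have := List.find?_eq_none.mp hf pr (hsub q hq pr hpr)
      simpa using this
    rw [pvFold_nil grille _ [] hnone]
    rfl
  | some a =>
    obtain ⟨haW, hpa, hmin⟩ := pvFind_min (pvQuad_pairwise _ _ _ _) hf
    rw [pvMem_quad] at haW
    have hmain : PySem.List.min2?
        (([("BD", x, mi, y, mj), ("BG", x, mi, mj, y + delta),
           ("HD", mi, x + delta, y, mj), ("HG", mi, x + delta, mj, y + delta)] :
          List (String × Int × Int × Int × Int)).foldl (pvStep grille) [])
        (fun c => c.1) (fun c => c.2.1) = some (a.1, a.2, pvClsA mi mj a.1 a.2) := by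
      apply pvPick grille (pvQuadPairs x (x + delta) y (y + delta)) _ a _ hsub _ _ hpa hmin
      · by_cases hi : a.1 < mi <;> by_cases hj : a.2 < mj
        · exact ⟨("BD", x, mi, y, mj), by simp, by simp [pvClsA, hi, hj],
            by rw [pvMem_quad]; dsimp only; exact ⟨haW.1, hi, haW.2.2.1, hj⟩⟩
        · refine ⟨("BG", x, mi, mj, y + delta), by simp, ?_, ?_⟩
          · have hj' : mj ≤ a.2 := by omega
            simp [pvClsA, hi, hj, hj']
          · rw [pvMem_quad]
            dsimp only
            exact ⟨haW.1, hi, by omega, haW.2.2.2⟩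
        · refine ⟨("HD", mi, x + delta, y, mj), by simp, ?_, ?_⟩
          · have hi' : mi ≤ a.1 := by omega
            simp [pvClsA, hi, hj, hi']
          · rw [pvMem_quad]
            dsimp only
            exact ⟨by omega, haW.2.1, haW.2.2.1, hj⟩
        · refine ⟨("HG", mi, x + delta, mj, y + delta), by simp, ?_, ?_⟩
          · have hi' : mi ≤ a.1 := by omega
            have hj' : mj ≤ a.2 := by omega
            simp [pvClsA, hi, hj, hi', hj']
          · rw [pvMem_quad]
            dsimp only
            exact ⟨by omega, haW.2.1, by omega, haW.2.2.2⟩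
      · intro q hq haq
        rw [pvMem_quad] at haq
        fin_cases hq <;>
          · dsimp at haq ⊢
            unfold pvClsA
            split_ifs <;> first | rfl | omega
    rw [hmain]
    rfl

-- ===== VERDICT (by name: the statement is the Claim_ definition above) =====
theorem trouve_case_occupee_spec : Claim_equal_trouve_case_occupee := by
  intro grille x y delta _ hpre
  unfold Spec_trouve_case_occupee trouve_case_occupee
  have hfd : PySem.Int.floordiv delta 2 = delta / 2 :=
    PySem.Int.floordiv_eq_ediv_of_pos (by omega)
  rw [pvOuterA_eq grille x y delta _ (pvPre_scan grille x y delta hpre)]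
  rw [show (PySem.List.pyRange x (x + delta) 1).flatMap
      (fun i => (PySem.List.pyRange y (y + delta) 1).map (fun j => (i, j))) =
      pvQuadPairs x (x + delta) y (y + delta) from rfl]
  simp only [trouve_case_occupee_alt, hfd]
  exact pvFinal grille x y delta _ _ rfl rfl
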